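-- pv_equiv track=rewrite | github.com/zzeuui/AlgorithmStudy | 1023/14500.py | i_tetromino
-- ===== SOURCE A (Python) =====
-- def i_tetromino(n, m, board):
--     # I tetromino
--     #row
--     temp = list()
--     for b in board:
--         v = sum(b[:4])
--         temp.append(v)
--         for i in range(m-4):
--             v = v - b[i] + b[i+4]
--             temp.append(v)
--
--     #colum
--     board = sum(board, [])
--     for i in range(m):
--         b = board[i::m]
--         v = sum(b[:4])
--         temp.append(v)
--         for i in range(n-4):
--             v = v - b[i] + b[i+4]
--             temp.append(v)
--
--     return max(temp)
-- ===== SOURCE B (Python) =====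
-- def i_tetromino(n, m, board):
--     def windows(line, d):
--         return [sum(line[:4])] + [sum(line[i + 1:i + 5]) for i in range(d - 4)]
--
--     flat = [x for row in board for x in row]
--     cands = [w for b in board for w in windows(b, m)]
--     cands += [w for i in range(m) for w in windows(flat[i::m], n)]
--     return max(cands)
-- ===== Notes on version B (the rewrite author's own statement) =====
-- stated objective: alternative
-- what changed: Replaces A's stateful sliding-window loops (v seeded with sum(b[:4]) then updated v = v - b[i] + b[i+4] with explicit temp.append calls) by stateless direct slice sums: each candidate is computed independently as sum(line[i+1:i+5]) in flat comprehensions, so no running value or accumulator list is maintained; Pre_ is exactly the inputs on which A returns (elsewhere A raises IndexError/ValueError).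
import Mathlib
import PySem

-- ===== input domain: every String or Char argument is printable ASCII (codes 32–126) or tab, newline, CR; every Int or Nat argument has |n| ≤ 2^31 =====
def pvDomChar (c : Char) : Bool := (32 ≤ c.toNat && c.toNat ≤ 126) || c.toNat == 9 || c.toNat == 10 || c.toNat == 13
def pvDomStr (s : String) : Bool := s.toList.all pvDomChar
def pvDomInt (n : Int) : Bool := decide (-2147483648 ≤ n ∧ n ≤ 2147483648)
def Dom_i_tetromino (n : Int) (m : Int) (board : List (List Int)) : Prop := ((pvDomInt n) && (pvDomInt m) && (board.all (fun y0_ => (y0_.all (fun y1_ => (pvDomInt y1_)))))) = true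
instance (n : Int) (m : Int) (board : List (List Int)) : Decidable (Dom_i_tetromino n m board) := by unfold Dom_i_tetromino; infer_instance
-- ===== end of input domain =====

-- B replaces A's stateful sliding-window update (v = v - b[i] + b[i+4] with an explicit
-- accumulator list) by stateless direct slice sums sum(line[i+1:i+5]) in flat comprehensions;
-- proved equal to A on Pre_ (exactly the inputs where A returns).


-- ===== PORT A =====
-- one line of A's work: v = sum(b[:4]); temp.append(v); then the running update
-- v = v - b[i] + b[i+4] for i in range(d-4), appending each v (d = m for a row, n for a column)
def iTetRunA (b : List Int) (d : Int) : List Int :=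
  let v := (PySem.List.slice b none (some 4)).sum
  ((PySem.List.pyRange 0 (d - 4) 1).foldl
    (fun (st : Int × List Int) i =>
      let v' := st.1 - PySem.List.pyGetD b i 0 + PySem.List.pyGetD b (i + 4) 0
      (v', st.2 ++ [v']))
    (v, [v])).2

def i_tetromino (n : Int) (m : Int) (board : List (List Int)) : Int :=
  let temp : List Int := board.foldl (fun acc b => acc ++ iTetRunA b m) []
  let flat := board.flatten          -- board = sum(board, [])
  let temp := (PySem.List.pyRange 0 m 1).foldl
    (fun acc i => acc ++ iTetRunA ((PySem.List.slice? flat (some i) none m).getD []) n) temp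
  (PySem.List.max? temp (fun x => x)).getD 0   -- max(temp); Pre_ guarantees temp ≠ []

-- ===== PORT B =====
-- 'windows' of Source B: the leading slice sum, then each window recomputed as sum(line[i+1:i+5])
def iTetWinB (line : List Int) (d : Int) : List Int :=
  [(PySem.List.slice line none (some 4)).sum] ++
    (PySem.List.pyRange 0 (d - 4) 1).map
      (fun i => (PySem.List.slice line (some (i + 1)) (some (i + 5))).sum)

def i_tetromino_alt (n : Int) (m : Int) (board : List (List Int)) : Int :=
  let flat := board.flatMap (fun row => row)
  let cands := board.flatMap (fun b => iTetWinB b m)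
  let cands := cands ++ (PySem.List.pyRange 0 m 1).flatMap
    (fun i => iTetWinB ((PySem.List.slice? flat (some i) none m).getD []) n)
  (PySem.List.max? cands (fun x => x)).getD 0   -- max(cands); Pre_ guarantees cands ≠ []

-- ===== PRECONDITION & SPEC =====
-- Pre_ is exactly where the Python A returns: the candidate list must be nonempty (else
-- max([]) raises ValueError), every row must have at least m cells when m > 4, and every
-- strided column A reads must have at least n cells when n > 4 (else b[i+4] raises IndexError).
def Pre_i_tetromino (n : Int) (m : Int) (board : List (List Int)) : Prop :=
  (board ≠ [] ∨ 0 < m) ∧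
  (4 < m → ∀ b ∈ board, m ≤ (b.length : Int)) ∧
  (4 < n → ∀ i ∈ PySem.List.pyRange 0 m 1,
      n ≤ (((PySem.List.slice? board.flatten (some i) none m).getD []).length : Int))
instance (n : Int) (m : Int) (board : List (List Int)) : Decidable (Pre_i_tetromino n m board) := by
  unfold Pre_i_tetromino; infer_instance

def pvWitness_i_tetromino : Int × Int × List (List Int) := (1, 1, [[3]])

def Spec_i_tetromino (n : Int) (m : Int) (board : List (List Int)) (out : Int) : Prop := out = i_tetromino_alt n m board
instance (n : Int) (m : Int) (board : List (List Int)) (out : Int) : Decidable (Spec_i_tetromino n m board out) := by unfold Spec_i_tetromino; infer_instance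

-- ===== CLAIM (what is proved, stated in full; the proofs are below) =====
def Claim_equal_i_tetromino : Prop := ∀ (n : Int) (m : Int) (board : List (List Int)), Dom_i_tetromino n m board → Pre_i_tetromino n m board → Spec_i_tetromino n m board (i_tetromino n m board)

-- ===== LEMMAS AND PROOFS =====

-- A's running value after indices 0..c-1 is the window sum, and its appends are the window list
theorem iTet_runA_loop (b : List Int) (c : Nat) :
    ∀ (a : Int) (acc : List Int), 0 ≤ a → a + (c : Int) + 4 ≤ (b.length : Int) →
    ((PySem.List.pyRange a (a + (c : Int)) 1).foldl
      (fun (st : Int × List Int) i =>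
        let v' := st.1 - PySem.List.pyGetD b i 0 + PySem.List.pyGetD b (i + 4) 0
        (v', st.2 ++ [v']))
      ((b.take (a + 4).toNat).sum - (b.take a.toNat).sum, acc))
    = ((b.take ((a + (c : Int)) + 4).toNat).sum - (b.take (a + (c : Int)).toNat).sum,
       acc ++ (PySem.List.pyRange (a + 1) (a + (c : Int) + 1) 1).map
         (fun j => (b.take (j + 4).toNat).sum - (b.take j.toNat).sum)) := by
  induction c with
  | zero =>
    intro a acc ha hb
    rw [show a + ((0:Nat):Int) = a by simp, PySem.List.pyRange_one_eq_nil (le_refl a),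
        PySem.List.pyRange_one_eq_nil (by omega)]
    simp
  | succ c ih =>
    intro a acc ha hb
    rw [PySem.List.pyRange_one_cons (by push_cast; omega)]
    simp only [List.foldl_cons]
    have hstep : (b.take (a + 4).toNat).sum - (b.take a.toNat).sum
        - PySem.List.pyGetD b a 0 + PySem.List.pyGetD b (a + 4) 0
        = (b.take ((a + 1) + 4).toNat).sum - (b.take (a + 1).toNat).sum := by
      have h1 : (a:Int) < b.length := by push_cast at hb; omega
      have h2 : (a + 4 : Int) < b.length := by push_cast at hb; omega
      rw [PySem.List.pyGetD_eq_getElem b (i := a) 0 ha h1,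
          PySem.List.pyGetD_eq_getElem b (i := a + 4) 0 (by omega) h2]
      have e1 : ((a:Int) + 1).toNat = a.toNat + 1 := by omega
      have e2 : ((a:Int) + 1 + 4).toNat = (a + 4).toNat + 1 := by omega
      rw [e1, e2, List.sum_take_succ b a.toNat (by omega), List.sum_take_succ b (a+4:Int).toNat (by omega)]
      have e3 : ((a:Int) + 4).toNat = a.toNat + 4 := by omega
      ring
    have harg : a + ((c:Int) + 1) = (a + 1) + (c:Int) := by ring
    push_cast
    rw [harg]
    have ih' := ih (a + 1) (acc ++ [(b.take ((a + 1) + 4).toNat).sum - (b.take (a + 1).toNat).sum])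
      (by omega) (by push_cast at hb ⊢; omega)
    simp only at hstep ih' ⊢
    rw [hstep, ih']
    refine congrArg (Prod.mk _) ?_
    rw [List.append_assoc]
    congr 1
    rw [PySem.List.pyRange_one_cons (show a + 1 < a + 1 + (c:Int) + 1 by omega), List.map_cons]
    simp

-- a slice sum is a difference of prefix sums (indices in bounds)
theorem iTet_slice_sum (b : List Int) (x y : Int) (hx : 0 ≤ x) (hxy : x ≤ y) :
    (PySem.List.slice b (some x) (some y)).sum = (b.take y.toNat).sum - (b.take x.toNat).sum := by
  rw [PySem.List.slice_toNat b hx (by omega)]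
  have hsplit : b.take y.toNat = b.take x.toNat ++ (b.drop x.toNat).take (y.toNat - x.toNat) := by
    rw [← List.take_add]
    congr 1
    omega
  rw [hsplit, List.sum_append]
  ring

-- per line, A's running windows and B's direct slice sums coincide
theorem iTet_seg_eq (b : List Int) (d : Int) (h : 4 < d → d ≤ (b.length : Int)) :
    iTetRunA b d = iTetWinB b d := by
  simp only [iTetRunA, iTetWinB]
  by_cases hd : 4 < d
  · have hL := h hd
    have hc : (((d - 4).toNat : Int)) = d - 4 := by omega
    have init4 : (PySem.List.slice b none (some 4)).sum
        = (b.take ((0:Int) + 4).toNat).sum - (b.take (0:Int).toNat).sum := by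
      rw [PySem.List.slice_to (xs := b) (b := 4) (by omega),
          show ((0:Int) + 4).toNat = 4 by omega, show ((0:Int)).toNat = 0 by omega]
      simp
    have hrw : (PySem.List.pyRange 0 (d - 4) 1)
        = (PySem.List.pyRange 0 (0 + (((d-4).toNat : Nat) : Int)) 1) := by
      rw [hc]; norm_num
    conv_lhs => rw [hrw, init4]
    rw [iTet_runA_loop b (d-4).toNat 0 _ (le_refl 0) (by omega)]
    simp only [hc]
    rw [show (0:Int) + (d - 4) + 1 = d - 3 by ring, show ((0:Int) + 1) = 1 by ring]
    rw [PySem.List.pyRange_one 1 (d - 3), PySem.List.pyRange_one 0 (d - 4), List.map_map,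
        show (d - 3 - 1) = d - 4 by ring, show (d - 4 - 0) = d - 4 by ring]
    rw [← init4, List.singleton_append]
    congr 1
    simp only [List.map_map]
    apply List.map_congr_left
    intro k hk
    rw [List.mem_range] at hk
    simp only [Function.comp]
    rw [iTet_slice_sum b ((0:Int) + k + 1) ((0:Int) + k + 5) (by omega) (by omega)]
    rw [show ((1:Int) + (k:Int) + 4).toNat = ((0:Int) + (k:Int) + 5).toNat by omega,
        show ((1:Int) + (k:Int)).toNat = ((0:Int) + (k:Int) + 1).toNat by omega]
  · -- d ≤ 4: no sliding windows on either side, both lists are the single leading slice sum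
    rw [PySem.List.pyRange_one_eq_nil (show d - 4 ≤ 0 by omega)]
    simp

-- the whole candidate lists coincide
theorem iTet_main (n : Int) (m : Int) (board : List (List Int))
    (h2 : 4 < m → ∀ b ∈ board, m ≤ (b.length : Int))
    (h3 : 4 < n → ∀ i ∈ PySem.List.pyRange 0 m 1,
      n ≤ (((PySem.List.slice? board.flatten (some i) none m).getD []).length : Int)) :
    i_tetromino n m board = i_tetromino_alt n m board := by
  simp only [i_tetromino, i_tetromino_alt]
  have hflat : board.flatMap (fun row => row) = board.flatten := by
    simp [List.flatMap_def]
  rw [hflat,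
      PySem.List.foldl_append_eq_flatMap, PySem.List.foldl_append_eq_flatMap, List.nil_append,
      List.flatMap_def, List.flatMap_def, List.flatMap_def, List.flatMap_def]
  have hr : board.map (fun b => iTetRunA b m) = board.map (fun b => iTetWinB b m) :=
    List.map_congr_left (fun b hb => iTet_seg_eq b m (fun h4 => h2 h4 b hb))
  have hc : (PySem.List.pyRange 0 m 1).map
        (fun i => iTetRunA ((PySem.List.slice? board.flatten (some i) none m).getD []) n)
      = (PySem.List.pyRange 0 m 1).map
        (fun i => iTetWinB ((PySem.List.slice? board.flatten (some i) none m).getD []) n) :=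
    List.map_congr_left (fun i hi => iTet_seg_eq _ n (fun h4 => h3 h4 i hi))
  rw [hr, hc]

-- ===== VERDICT (by name: the statement is the Claim_ definition above) =====
theorem i_tetromino_spec : Claim_equal_i_tetromino := by
  intro n m board _hdom hpre
  obtain ⟨_h1, h2, h3⟩ := hpre
  unfold Spec_i_tetromino
  exact iTet_main n m board h2 h3
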